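-- pv_equiv track=rewrite | github.com/DanishHaji/The-CRM-Digital-FTE-Factory-Hackathon-5 | backend/src/channels/whatsapp_handler.py | split_whatsapp_message
-- ===== SOURCE A (Python) =====
-- from typing import Dict, Any, Optional, List, Tuple
--
-- def split_whatsapp_message(message: str, max_length: int = 1600) -> List[str]:
--     """
--     Split long WhatsApp message into multiple parts (Twilio limit is 1600 chars).
--
--     Args:
--         message: Message to split
--         max_length: Maximum characters per message (default 1600)
--
--     Returns:
--         List of message parts (each <= max_length)
--     """
--     # If message fits in one part, return as-is
--     if len(message) <= max_length:
--         return [message]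
--
--     parts = []
--     remaining = message
--
--     # Calculate how many parts needed
--     num_parts = (len(message) + max_length - 1) // max_length
--
--     # Reserve space for part indicators: "(part X/Y) "
--     indicator_length = len(f"(part {num_parts}/{num_parts}) ")
--     usable_length = max_length - indicator_length
--
--     part_num = 1
--     while remaining:
--         # Extract chunk at word boundary
--         if len(remaining) <= usable_length:
--             chunk = remaining
--             remaining = ""
--         else:
--             # Find last space before limit
--             chunk = remaining[:usable_length]
--             last_space = chunk.rfind(' ')
--
--             if last_space > 0:
--                 chunk = remaining[:last_space]
--                 remaining = remaining[last_space:].strip()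
--             else:
--                 # No space found, hard split
--                 chunk = remaining[:usable_length]
--                 remaining = remaining[usable_length:]
--
--         # Add part indicator
--         part_message = f"(part {part_num}/{num_parts}) {chunk}"
--         parts.append(part_message)
--         part_num += 1
--
--     return parts
-- ===== SOURCE B (Python) =====
-- from typing import List
--
--
-- def split_whatsapp_message(message: str, max_length: int = 1600) -> List[str]:
--     """Single O(n) pass over the message using index pointers and positional
--     rfind, instead of repeatedly re-slicing and re-copying the remaining string."""
--     n = len(message)
--     if n <= max_length:
--         return [message]
--
--     num_parts = (n + max_length - 1) // max_length
--     usable = max_length - len(f"(part {num_parts}/{num_parts}) ")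
--
--     parts = []
--     i, j = 0, n          # message[i:j] is what remains to be emitted
--     part_num = 1
--     while i < j:
--         if j - i <= usable:
--             k = j
--             ni = j
--         else:
--             sp = message.rfind(' ', i, i + usable)
--             if sp > i:
--                 k = sp
--                 # strip(): skip whitespace after the split point and drop
--                 # trailing whitespace of the remainder (done once, in place)
--                 ni = sp
--                 while ni < j and message[ni].isspace():
--                     ni += 1
--                 while j > ni and message[j - 1].isspace():
--                     j -= 1
--             else:
--                 k = i + usable
--                 ni = k
--         parts.append(f"(part {part_num}/{num_parts}) {message[i:k]}")
--         part_num += 1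
--         i = ni
--     return parts
-- ===== Notes on version B (the rewrite author's own statement) =====
-- stated objective: alternative
-- what changed: B replaces A's repeated slice-copy-and-strip of the shrinking `remaining` string by a single pass over the original message with two index pointers, a bounded positional rfind and in-place whitespace scans; intended as faster, but a timing run read only about 1.4x at the largest size, so no speed is claimed.
-- outside the precondition, e.g. on split_whatsapp_message('b abbb    ', 9): A returns ['(part 1/2) b abbb '], B returns ['(part 1/2) b abbb ']
import Mathlib
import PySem

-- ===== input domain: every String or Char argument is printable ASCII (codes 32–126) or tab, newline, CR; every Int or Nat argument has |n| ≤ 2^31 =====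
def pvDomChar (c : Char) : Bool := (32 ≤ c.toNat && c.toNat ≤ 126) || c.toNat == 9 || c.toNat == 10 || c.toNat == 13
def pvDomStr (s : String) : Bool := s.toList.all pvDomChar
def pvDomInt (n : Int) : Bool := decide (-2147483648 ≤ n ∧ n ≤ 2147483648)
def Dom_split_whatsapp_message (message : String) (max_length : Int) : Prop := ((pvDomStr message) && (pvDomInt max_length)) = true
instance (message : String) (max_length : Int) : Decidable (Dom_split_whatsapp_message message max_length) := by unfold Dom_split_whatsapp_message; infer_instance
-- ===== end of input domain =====

-- B is a single index-pointer pass (bounded positional rfind + in-place whitespace scans) instead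
-- of A's repeated slice-and-strip of the remaining string; objective: alternative (avoids
-- re-copying the tail on every iteration; measured speed gain was below the 1.5x bar).

-- shared formatting helper: the characters of f"(part {p}/{np}) {chunk}"
def pvPartChars (p np : Int) (chunk : List Char) : List Char :=
  "(part ".toList ++ PySem.Int.toChars p ++ "/".toList ++ PySem.Int.toChars np ++ ") ".toList ++ chunk

-- ===== PORT A =====
-- A's while loop; fuel only makes it total (A diverges when usable < 1, which Pre_ excludes;
-- with 1 ≤ usable each iteration strictly shortens `remaining`, so `length+1` fuel suffices).
def pvLoopA (np usable : Int) (fuel : Nat) (p : Int) (remaining : List Char) : List String :=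
  match fuel with
  | 0 => []
  | fuel' + 1 =>
    if remaining = [] then []
    else
      let step :=
        if (remaining.length : Int) ≤ usable then (remaining, ([] : List Char))
        else
          let chunk := PySem.List.slice remaining none (some usable)
          let last_space := PySem.Chars.rfind chunk [' ']
          if 0 < last_space then
            (PySem.List.slice remaining none (some last_space),
             PySem.Chars.strip (PySem.List.slice remaining (some last_space) none))
          else
            (PySem.List.slice remaining none (some usable),
             PySem.List.slice remaining (some usable) none)
      String.ofList (pvPartChars p np step.1) :: pvLoopA np usable fuel' (p + 1) step.2

def split_whatsapp_message (message : String) (max_length : Int) : List String :=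
  let msg := message.toList
  if (msg.length : Int) ≤ max_length then [message]
  else
    let num_parts := PySem.Int.floordiv ((msg.length : Int) + max_length - 1) max_length
    let usable := max_length - ((pvPartChars num_parts num_parts []).length : Int)
    pvLoopA num_parts usable (msg.length + 1) 1 msg

-- ===== PORT B =====
-- Source B's inner `while ni < j and message[ni].isspace(): ni += 1`
def pvSkipWs (msg : List Char) (j : Nat) (i : Nat) : Nat :=
  if i < j ∧ PySem.Chars.isspace (msg.getD i ' ') then pvSkipWs msg j (i + 1) else i
termination_by j - i
decreasing_by omega

-- Source B's inner `while j > ni and message[j-1].isspace(): j -= 1`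
def pvTrimWs (msg : List Char) (lo : Nat) (j : Nat) : Nat :=
  if lo < j ∧ PySem.Chars.isspace (msg.getD (j - 1) ' ') then pvTrimWs msg lo (j - 1) else j
termination_by j
decreasing_by omega

-- Source B's main pointer loop; fuel for totality only (under Pre_ the span j-i strictly shrinks).
def pvLoopB (msg : List Char) (np usable : Int) (fuel : Nat) (p : Int) (i j : Nat) : List String :=
  match fuel with
  | 0 => []
  | fuel' + 1 =>
    if i < j then
      if ((j : Int) - (i : Int)) ≤ usable then
        String.ofList (pvPartChars p np (PySem.List.slice msg (some (i : Int)) (some (j : Int)))) ::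
          pvLoopB msg np usable fuel' (p + 1) j j
      else
        let sp := PySem.Chars.rfindFrom msg [' '] (i : Int) (some ((i : Int) + usable))
        if (i : Int) < sp then
          let ni := pvSkipWs msg j sp.toNat
          let j' := pvTrimWs msg ni j
          String.ofList (pvPartChars p np (PySem.List.slice msg (some (i : Int)) (some sp))) ::
            pvLoopB msg np usable fuel' (p + 1) ni j'
        else
          String.ofList (pvPartChars p np (PySem.List.slice msg (some (i : Int)) (some ((i : Int) + usable)))) ::
            pvLoopB msg np usable fuel' (p + 1) (i + usable.toNat) j
    else []

def split_whatsapp_message_alt (message : String) (max_length : Int) : List String :=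
  let msg := message.toList
  if (msg.length : Int) ≤ max_length then [message]
  else
    let num_parts := PySem.Int.floordiv ((msg.length : Int) + max_length - 1) max_length
    let usable := max_length - ((pvPartChars num_parts num_parts []).length : Int)
    pvLoopB msg num_parts usable (msg.length + 1) 1 0 msg.length

-- ===== PRECONDITION & SPEC =====
-- Pre_ excludes the inputs with usable width `max_length - len("(part N/N) ") < 1` (and the
-- ZeroDivisionError at max_length = 0): there A's loop usually never terminates, and where it
-- happens to return, its chunks come from Python's negative-slice wraparound — an accident of
-- A's implementation, not a splitting anyone would specify.
def Pre_split_whatsapp_message (message : String) (max_length : Int) : Prop :=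
  (message.toList.length : Int) ≤ max_length ∨
  (max_length ≠ 0 ∧
    1 ≤ max_length -
      ((pvPartChars (PySem.Int.floordiv ((message.toList.length : Int) + max_length - 1) max_length)
                    (PySem.Int.floordiv ((message.toList.length : Int) + max_length - 1) max_length)
                    []).length : Int))
instance (message : String) (max_length : Int) : Decidable (Pre_split_whatsapp_message message max_length) := by
  unfold Pre_split_whatsapp_message; infer_instance

def pvWitness_split_whatsapp_message : String × Int := ("hello world this is a test of parts", 20)

def Spec_split_whatsapp_message (message : String) (max_length : Int) (out : List String) : Prop := out = split_whatsapp_message_alt message max_length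
instance (message : String) (max_length : Int) (out : List String) : Decidable (Spec_split_whatsapp_message message max_length out) := by unfold Spec_split_whatsapp_message; infer_instance

-- ===== CLAIM (what is proved, stated in full; the proofs are below) =====
def Claim_equal_split_whatsapp_message : Prop := ∀ (message : String) (max_length : Int), Dom_split_whatsapp_message message max_length → Pre_split_whatsapp_message message max_length → Spec_split_whatsapp_message message max_length (split_whatsapp_message message max_length)

-- ===== LEMMAS AND PROOFS =====

theorem pv_rstrip_append (xs : List Char) (c : Char) :
    PySem.Chars.rstrip (xs ++ [c]) =
      if PySem.Chars.isspace c then PySem.Chars.rstrip xs else xs ++ [c] := by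
  simp [PySem.Chars.rstrip, List.dropWhile_cons]
  split_ifs <;> simp

theorem pv_rfind_go_bounds (s sub : List Char) (k : Nat) :
    -1 ≤ PySem.Chars.rfind.go s sub k ∧ PySem.Chars.rfind.go s sub k ≤ (k : Int) := by
  induction k with
  | zero => simp [PySem.Chars.rfind.go]; split_ifs <;> simp
  | succ j ih =>
    rw [PySem.Chars.rfind.go]
    split_ifs <;> simp <;> omega

theorem pv_rfind_bounds (s sub : List Char) :
    -1 ≤ PySem.Chars.rfind s sub ∧ PySem.Chars.rfind s sub ≤ (s.length : Int) := by
  exact pv_rfind_go_bounds s sub s.length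

theorem pv_sub_snoc (msg : List Char) (lo j : Nat) (h1 : lo < j) (h2 : j ≤ msg.length) :
    (msg.drop lo).take (j - lo) = (msg.drop lo).take (j - 1 - lo) ++ [msg[j-1]'(by omega)] := by
  have hx : j - lo = (j - 1 - lo) + 1 := by omega
  rw [hx, List.take_add_one]
  congr 1
  rw [List.getElem?_drop]
  have : lo + (j - 1 - lo) = j - 1 := by omega
  rw [this, List.getElem?_eq_getElem (by omega)]
  rfl

theorem pv_skipWs_spec (msg : List Char) (j : Nat) (hj : j ≤ msg.length) :
    ∀ a, a ≤ j →
      a ≤ pvSkipWs msg j a ∧ pvSkipWs msg j a ≤ j ∧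
      List.dropWhile PySem.Chars.isspace ((msg.drop a).take (j - a))
        = (msg.drop (pvSkipWs msg j a)).take (j - pvSkipWs msg j a) := by
  intro a ha
  fun_induction pvSkipWs msg j a with
  | case1 i h ih =>
    obtain ⟨hij, hsp⟩ := h
    have hil : i < msg.length := lt_of_lt_of_le hij hj
    have hd : msg.drop i = msg[i] :: msg.drop (i + 1) := List.drop_eq_getElem_cons hil
    have hget : msg.getD i ' ' = msg[i] := by
      simp [List.getD, List.getElem?_eq_getElem hil]
    have htk : (msg.drop i).take (j - i) = msg[i] :: (msg.drop (i + 1)).take (j - (i + 1)) := by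
      rw [hd]
      have : j - i = (j - (i+1)) + 1 := by omega
      rw [this, List.take_succ_cons]
    rw [htk, List.dropWhile_cons, if_pos (by rw [← hget]; exact hsp)]
    have := ih (by omega)
    exact ⟨by omega, this.2.1, this.2.2⟩
  | case2 i h =>
    refine ⟨le_rfl, ha, ?_⟩
    rcases Nat.lt_or_ge i j with hij | hij
    · have hil : i < msg.length := lt_of_lt_of_le hij hj
      have hd : msg.drop i = msg[i] :: msg.drop (i + 1) := List.drop_eq_getElem_cons hil
      have hget : msg.getD i ' ' = msg[i] := by
        simp [List.getD, List.getElem?_eq_getElem hil]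
      have hsp : ¬ PySem.Chars.isspace msg[i] := by
        intro hc; exact h ⟨hij, by rw [hget]; exact hc⟩
      have htk : (msg.drop i).take (j - i) = msg[i] :: (msg.drop (i + 1)).take (j - (i + 1)) := by
        rw [hd]
        have : j - i = (j - (i+1)) + 1 := by omega
        rw [this, List.take_succ_cons]
      rw [htk, List.dropWhile_cons, if_neg (by simpa using hsp), ← htk]
    · have : j - i = 0 := by omega
      simp [this]

theorem pv_trimWs_spec (msg : List Char) (lo : Nat) :
    ∀ j, lo ≤ j → j ≤ msg.length →
      lo ≤ pvTrimWs msg lo j ∧ pvTrimWs msg lo j ≤ j ∧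
      PySem.Chars.rstrip ((msg.drop lo).take (j - lo))
        = (msg.drop lo).take (pvTrimWs msg lo j - lo) := by
  intro j hlo hj
  fun_induction pvTrimWs msg lo j with
  | case1 j h ih =>
    obtain ⟨hlj, hsp⟩ := h
    have hjl : j - 1 < msg.length := by omega
    have hget : msg.getD (j-1) ' ' = msg[j-1] := by
      simp [List.getD, List.getElem?_eq_getElem hjl]
    rw [pv_sub_snoc msg lo j hlj hj, pv_rstrip_append,
        if_pos (by rw [← hget]; exact hsp)]
    have := ih (by omega) (by omega)
    exact ⟨this.1, by omega, this.2.2⟩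
  | case2 j h =>
    refine ⟨hlo, le_rfl, ?_⟩
    rcases Nat.lt_or_ge lo j with hlj | hlj
    · have hjl : j - 1 < msg.length := by omega
      have hget : msg.getD (j-1) ' ' = msg[j-1] := by
        simp [List.getD, List.getElem?_eq_getElem hjl]
      have hsp : ¬ PySem.Chars.isspace msg[j-1] := by
        intro hc; exact h ⟨hlj, by rw [hget]; exact hc⟩
      rw [pv_sub_snoc msg lo j hlj hj, pv_rstrip_append,
          if_neg (by simpa using hsp), ← pv_sub_snoc msg lo j hlj hj]
    · have : j - lo = 0 := by omega
      simp [this, PySem.Chars.rstrip]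

theorem pv_loop_eq (msg : List Char) (np usable : Int) (hu : 1 ≤ usable) (fuel : Nat) :
    ∀ i j p, i ≤ j → j ≤ msg.length →
      pvLoopA np usable fuel p ((msg.drop i).take (j - i)) = pvLoopB msg np usable fuel p i j := by
  induction fuel with
  | zero => intro i j p _ _; simp [pvLoopA, pvLoopB]
  | succ fuel ih =>
    intro i j p hij hj
    by_cases hlt : i < j
    case neg =>
      have h0 : j - i = 0 := by omega
      simp [h0, pvLoopA, pvLoopB, hlt]
    case pos =>
    have hlen : ((msg.drop i).take (j - i)).length = j - i := by simp; omega
    have hne : (msg.drop i).take (j - i) ≠ [] := by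
      intro hc; rw [hc] at hlen; simp at hlen; omega
    rw [pvLoopA, pvLoopB]
    rw [if_neg hne, if_pos hlt]
    simp only [hlen, Nat.cast_sub (le_of_lt hlt)]
    by_cases hfit : ((j : Int) - (i : Int) ≤ usable)
    · rw [if_pos hfit, if_pos hfit]
      congr 1
      · rw [PySem.List.slice_natCast]
      · have := ih j j (p + 1) le_rfl hj
        simpa using this
    · rw [if_neg hfit, if_neg hfit]
      set u := usable.toNat with hu_def
      have hu0 : (0 : Int) ≤ usable := by omega
      have husable : usable = (u : Int) := by omega
      have huj : i + u < j := by omega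
      have hujl : i + u < msg.length := by omega
      -- chunk0 = remaining[:usable] = (msg.drop i).take u
      have hch0 : PySem.List.slice ((msg.drop i).take (j - i)) none (some usable)
          = (msg.drop i).take u := by
        rw [PySem.List.slice_to _ hu0, List.take_take, ← hu_def]
        congr 1; omega
      -- B's positional rfind window is the same list
      have hdroptake : (msg.take ((i : Int) + usable).toNat).drop ((i : Int)).toNat
          = (msg.drop i).take u := by
        rw [List.drop_take]
        (congr 1; omega)
      set r := PySem.Chars.rfind ((msg.drop i).take u) [' '] with hr_def
      have hrb := pv_rfind_bounds ((msg.drop i).take u) [' ']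
      have hrlen : (((msg.drop i).take u).length : Int) = (u : Int) := by simp; omega
      rw [hrlen] at hrb
      have hsp : PySem.Chars.rfindFrom msg [' '] (i : Int) (some ((i : Int) + usable))
          = (if r = -1 then -1 else (i : Int) + r) := by
        simp only [PySem.Chars.rfindFrom]
        rw [if_neg (show ¬((msg.length : Int) < (i : Int) + usable) by omega),
            if_neg (show ¬((i : Int) + usable < 0) by omega),
            if_neg (show ¬((i : Int) < 0) by omega),
            if_neg (show ¬((i : Int) + usable < (i : Int)) by omega),
            hdroptake, ← hr_def]
      rw [hch0, hsp]
      by_cases hpos : 0 < r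
      · have hrne : r ≠ -1 := by omega
        rw [if_pos hpos, if_neg hrne, if_pos (show (i : Int) < (i : Int) + r by omega)]
        have hAchunk : PySem.List.slice ((msg.drop i).take (j - i)) none (some r)
            = (msg.drop i).take r.toNat := by
          rw [PySem.List.slice_to _ (by omega), List.take_take]
          congr 1; omega
        have hBchunk : PySem.List.slice msg (some (i : Int)) (some ((i : Int) + r))
            = (msg.drop i).take r.toNat := by
          rw [PySem.List.slice_toNat msg (by omega) (by omega)]
          (congr 1; omega)
        have hrest : PySem.List.slice ((msg.drop i).take (j - i)) (some r) none
            = (msg.drop (i + r.toNat)).take (j - (i + r.toNat)) := by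
          rw [PySem.List.slice_from _ (by omega), List.drop_take, List.drop_drop]
          congr 1
          omega
        have haj : i + r.toNat ≤ j := by omega
        obtain ⟨hs1, hs2, hs3⟩ := pv_skipWs_spec msg j hj (i + r.toNat) haj
        obtain ⟨ht1, ht2, ht3⟩ := pv_trimWs_spec msg (pvSkipWs msg j (i + r.toNat)) j hs2 hj
        have htn : ((i : Int) + r).toNat = i + r.toNat := by omega
        rw [hAchunk, hBchunk, hrest, htn]
        congr 1
        have hstrip : PySem.Chars.strip ((msg.drop (i + r.toNat)).take (j - (i + r.toNat)))
            = (msg.drop (pvSkipWs msg j (i + r.toNat))).take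
                (pvTrimWs msg (pvSkipWs msg j (i + r.toNat)) j - pvSkipWs msg j (i + r.toNat)) := by
          rw [PySem.Chars.strip, PySem.Chars.lstrip, hs3, ht3]
        rw [hstrip]
        exact ih _ _ (p + 1) ht1 (le_trans ht2 hj)
      · have hnc : ¬ ((i : Int) < (if r = -1 then -1 else (i : Int) + r)) := by
          split_ifs <;> omega
        rw [if_neg hpos, if_neg hnc]
        have hBchunk : PySem.List.slice msg (some (i : Int)) (some ((i : Int) + usable))
            = (msg.drop i).take u := by
          rw [PySem.List.slice_toNat msg (by omega) (by omega)]
          (congr 1; omega)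
        have hrest : PySem.List.slice ((msg.drop i).take (j - i)) (some usable) none
            = (msg.drop (i + u)).take (j - (i + u)) := by
          rw [PySem.List.slice_from _ hu0, List.drop_take, List.drop_drop, ← hu_def]
          congr 1
          omega
        dsimp only
        rw [hBchunk, hrest]
        congr 1
        exact ih _ _ (p + 1) (by omega) hj

-- ===== VERDICT (by name: the statement is the Claim_ definition above) =====
theorem split_whatsapp_message_spec : Claim_equal_split_whatsapp_message := by
  intro message max_length _hdom hpre
  unfold Spec_split_whatsapp_message split_whatsapp_message split_whatsapp_message_alt
  by_cases hle : ((message.toList.length : Int) ≤ max_length)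
  · simp only [if_pos hle]
  · simp only [if_neg hle]
    rcases hpre with h | ⟨_, h⟩
    · exact absurd h hle
    · have h0 : (message.toList.drop 0).take (message.toList.length - 0) = message.toList := by simp
      have := pv_loop_eq message.toList
        (PySem.Int.floordiv ((message.toList.length : Int) + max_length - 1) max_length)
        (max_length - ((pvPartChars (PySem.Int.floordiv ((message.toList.length : Int) + max_length - 1) max_length) (PySem.Int.floordiv ((message.toList.length : Int) + max_length - 1) max_length) []).length : Int))
        (by omega) (message.toList.length + 1) 0 message.toList.length 1 (Nat.zero_le _) le_rfl
      rw [h0] at this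
      exact this
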